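-- pv_equiv track=rewrite | github.com/devarajselvan3035/Python | leetcode/Binary_Search_Tree/744_find_smallest_letter_greater_than_target.py | nextGreatesLetter
-- ===== SOURCE A (Python) =====
-- from typing import List
--
-- def nextGreatesLetter(letters: List[str], target: str) -> str:
--     left, right = 0, len(letters) - 1
--     while left <= right:
--         mid = (left + right) // 2
--         if letters[mid] <= target:
--             left = mid + 1
--         else:
--             right = mid - 1
--
--     return letters[left] if left < len(letters) else letters[0]
-- ===== SOURCE B (Python) =====
-- def nextGreatesLetter(letters, target):
--     for c in letters:
--         if c > target:
--             return c
--     return letters[0]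
-- ===== Notes on version B (the rewrite author's own statement) =====
-- stated objective: simpler
-- what changed: Replaces the hand-written binary search with a single left-to-right linear scan returning the first letter strictly greater than target, falling back to letters[0] for the wraparound.
-- outside the precondition, e.g. on nextGreatesLetter([], 'a'): A raises IndexError, B raises IndexError; on nextGreatesLetter(['c', 'a', 'b'], 'a'): A returns 'b', B returns 'c'
import Mathlib
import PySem

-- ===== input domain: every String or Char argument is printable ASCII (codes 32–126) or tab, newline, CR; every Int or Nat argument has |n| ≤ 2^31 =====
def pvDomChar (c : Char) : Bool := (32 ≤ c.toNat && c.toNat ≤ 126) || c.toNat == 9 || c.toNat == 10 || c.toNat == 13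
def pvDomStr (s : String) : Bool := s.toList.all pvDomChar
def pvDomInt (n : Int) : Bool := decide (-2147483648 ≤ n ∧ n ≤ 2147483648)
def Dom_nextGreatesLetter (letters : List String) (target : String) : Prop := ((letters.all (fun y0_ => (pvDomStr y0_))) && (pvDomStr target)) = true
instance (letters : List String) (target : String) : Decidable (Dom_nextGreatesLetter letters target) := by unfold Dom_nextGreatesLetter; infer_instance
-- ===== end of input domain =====

-- B replaces A's binary search by a single linear scan for the first letter > target
-- (objective: simpler); agreement is claimed on nonempty sorted lists (the function's
-- natural domain — LeetCode 744 guarantees a sorted nonempty array).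

-- ===== PORT A =====
-- the while loop of A: returns the final value of `left`
def loopA (letters : List String) (target : String) (left right : Int) : Int :=
  if h : left ≤ right then
    let mid := PySem.Int.floordiv (left + right) 2
    if PySem.List.pyGetD letters mid "" ≤ target then
      loopA letters target (mid + 1) right
    else
      loopA letters target left (mid - 1)
  else left
termination_by (right + 1 - left).toNat
decreasing_by
  · have := PySem.Int.floordiv_two_mid_bounds h; omega
  · have := PySem.Int.floordiv_two_mid_bounds h; omega

def nextGreatesLetter (letters : List String) (target : String) : String :=
  let left := loopA letters target 0 ((letters.length : Int) - 1)
  if left < (letters.length : Int) then PySem.List.pyGetD letters left ""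
  else PySem.List.pyGetD letters 0 ""

-- ===== PORT B =====
-- Source B's for-loop over the letters; the post-loop fallback is letters[0]
def scanB (letters0 : List String) (target : String) : List String → String
  | [] => PySem.List.pyGetD letters0 0 ""
  | c :: rest => if target < c then c else scanB letters0 target rest

def nextGreatesLetter_alt (letters : List String) (target : String) : String :=
  scanB letters target letters

-- ===== PRECONDITION & SPEC =====
-- Pre_ excludes the empty list, on which both programs raise IndexError, and unsorted
-- lists not uniformly ≤ or > target, on which the answer of A's binary search is an
-- accident of probe order (the function's contract — LeetCode 744 — requires a sorted
-- list); uniformly-≤ and uniformly-> lists are kept: there both return letters[0].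
-- (comparisons are stated on toList so they kernel-evaluate; by String.le_iff_toList_le
-- and String.lt_iff_toList_lt they are exactly String ≤ / <, i.e. Python's string order)
def Pre_nextGreatesLetter (letters : List String) (target : String) : Prop :=
  letters ≠ [] ∧
  (letters.Pairwise (fun a b => a.toList ≤ b.toList) ∨
   (∀ c ∈ letters, c.toList ≤ target.toList) ∨
   (∀ c ∈ letters, target.toList < c.toList))
instance (letters : List String) (target : String) : Decidable (Pre_nextGreatesLetter letters target) := by
  unfold Pre_nextGreatesLetter; infer_instance

def pvWitness_nextGreatesLetter : List String × String := (["a", "c", "f"], "b")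

def Spec_nextGreatesLetter (letters : List String) (target : String) (out : String) : Prop := out = nextGreatesLetter_alt letters target
instance (letters : List String) (target : String) (out : String) : Decidable (Spec_nextGreatesLetter letters target out) := by unfold Spec_nextGreatesLetter; infer_instance

-- ===== CLAIM (what is proved, stated in full; the proofs are below) =====
def Claim_equal_nextGreatesLetter : Prop := ∀ (letters : List String) (target : String), Dom_nextGreatesLetter letters target → Pre_nextGreatesLetter letters target → Spec_nextGreatesLetter letters target (nextGreatesLetter letters target)

-- ===== LEMMAS AND PROOFS =====

-- Invariant of A's binary search on a sorted list: everything left of the final `left`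
-- is ≤ target and everything from it on is > target.
lemma loopA_inv (letters : List String) (target : String)
    (hs : ∀ (i j : Nat) (_ : i < letters.length) (_ : j < letters.length),
        i ≤ j → letters[i] ≤ letters[j]) :
    ∀ (fuel : Nat) (left right : Int),
    (right + 1 - left).toNat ≤ fuel →
    0 ≤ left → right < (letters.length : Int) → left ≤ right + 1 →
    (∀ (i : Nat) (_ : i < letters.length), (i : Int) < left → letters[i] ≤ target) →
    (∀ (i : Nat) (_ : i < letters.length), right < (i : Int) → target < letters[i]) →
    0 ≤ loopA letters target left right ∧
    loopA letters target left right ≤ (letters.length : Int) ∧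
    (∀ (i : Nat) (_ : i < letters.length), (i : Int) < loopA letters target left right → letters[i] ≤ target) ∧
    (∀ (i : Nat) (_ : i < letters.length), loopA letters target left right ≤ (i : Int) → target < letters[i]) := by
  intro fuel
  induction fuel with
  | zero =>
    intro left right hf h0 hr hlr hlo hhi
    rw [loopA]
    have : ¬ left ≤ right := by omega
    simp only [this, dite_false]
    exact ⟨h0, by omega, hlo, fun i hi hLi => hhi i hi (by omega)⟩
  | succ n ih =>
    intro left right hf h0 hr hlr hlo hhi
    rw [loopA]
    by_cases h : left ≤ right
    · simp only [h, dite_true]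
      have hmid := PySem.Int.floordiv_two_mid_bounds h
      set mid := PySem.Int.floordiv (left + right) 2 with hmiddef
      have hmid0 : 0 ≤ mid := by omega
      have hmidlen : mid < (letters.length : Int) := by omega
      have hmidnat : mid.toNat < letters.length := by omega
      have hget : PySem.List.pyGetD letters mid "" = letters[mid.toNat] :=
        PySem.List.pyGetD_eq_getElem _ _ hmid0 hmidlen
      rw [hget]
      by_cases hc : letters[mid.toNat] ≤ target
      · simp only [hc, if_true]
        apply ih (mid + 1) right (by omega) (by omega) hr (by omega)
        · intro i hi hlt
          by_cases hil : (i : Int) < left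
          · exact hlo i hi hil
          · exact le_trans (hs i mid.toNat hi hmidnat (by omega)) hc
        · exact hhi
      · simp only [hc, if_false]
        apply ih left (mid - 1) (by omega) h0 (by omega) (by omega) hlo
        intro i hi hgt
        by_cases hir : right < (i : Int)
        · exact hhi i hi hir
        · exact lt_of_lt_of_le (not_le.mp hc) (hs mid.toNat i hmidnat hi (by omega))
    · simp only [h, dite_false]
      exact ⟨h0, by omega, hlo, fun i hi hLi => hhi i hi (by omega)⟩

-- B's scan when no letter is greater than target: the wraparound value
lemma scanB_none (letters0 : List String) (target : String) :
    ∀ l : List String, (∀ c ∈ l, ¬ target < c) →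
    scanB letters0 target l = PySem.List.pyGetD letters0 0 "" := by
  intro l
  induction l with
  | nil => intro _; rfl
  | cons c rest ih =>
    intro h
    simp only [scanB, h c (by simp), if_false]
    exact ih fun x hx => h x (by simp [hx])

-- B's scan when a first greater letter exists
lemma scanB_find (letters0 : List String) (target : String) :
    ∀ (xs : List String) (c : String) (ys : List String),
    (∀ x ∈ xs, ¬ target < x) → target < c →
    scanB letters0 target (xs ++ c :: ys) = c := by
  intro xs c ys hxs hc
  induction xs with
  | nil => simp [scanB, hc]
  | cons x rest ih =>
    simp only [List.cons_append, scanB, hxs x (by simp), if_false]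
    exact ih fun y hy => hxs y (by simp [hy])

-- When every letter is ≤ target, A's loop always takes the left branch: left ends at right+1
lemma loopA_all_le (letters : List String) (target : String)
    (h : ∀ c ∈ letters, c ≤ target) :
    ∀ (fuel : Nat) (left right : Int), (right + 1 - left).toNat ≤ fuel →
    0 ≤ left → right < (letters.length : Int) → left ≤ right + 1 →
    loopA letters target left right = right + 1 := by
  intro fuel
  induction fuel with
  | zero =>
    intro left right hf h0 hr hlr
    rw [loopA]
    have hnl : ¬ left ≤ right := by omega
    simp only [hnl, dite_false]; omega
  | succ n ih =>
    intro left right hf h0 hr hlr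
    rw [loopA]
    by_cases hc : left ≤ right
    · simp only [hc, dite_true]
      have hmid := PySem.Int.floordiv_two_mid_bounds hc
      set mid := PySem.Int.floordiv (left + right) 2 with hmiddef
      have hg : PySem.List.pyGetD letters mid "" = letters[mid.toNat]'(by omega) :=
        PySem.List.pyGetD_eq_getElem _ _ (by omega) (by omega)
      rw [hg]
      simp only [h _ (List.getElem_mem _), if_true]
      exact ih (mid + 1) right (by omega) (by omega) hr (by omega)
    · simp only [hc, dite_false]; omega

-- When every letter is > target, A's loop always takes the right branch: left stays put
lemma loopA_all_gt (letters : List String) (target : String)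
    (h : ∀ c ∈ letters, target < c) :
    ∀ (fuel : Nat) (left right : Int), (right + 1 - left).toNat ≤ fuel →
    0 ≤ left → right < (letters.length : Int) →
    loopA letters target left right = left := by
  intro fuel
  induction fuel with
  | zero =>
    intro left right hf h0 hr
    rw [loopA]
    have hnl : ¬ left ≤ right := by omega
    simp only [hnl, dite_false]
  | succ n ih =>
    intro left right hf h0 hr
    rw [loopA]
    by_cases hc : left ≤ right
    · simp only [hc, dite_true]
      have hmid := PySem.Int.floordiv_two_mid_bounds hc
      set mid := PySem.Int.floordiv (left + right) 2 with hmiddef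
      have hg : PySem.List.pyGetD letters mid "" = letters[mid.toNat]'(by omega) :=
        PySem.List.pyGetD_eq_getElem _ _ (by omega) (by omega)
      rw [hg]
      simp only [not_le.mpr (h _ (List.getElem_mem _)), if_false]
      exact ih left (mid - 1) (by omega) h0 (by omega)
    · simp only [hc, dite_false]

-- ===== VERDICT (by name: the statement is the Claim_ definition above) =====
theorem nextGreatesLetter_spec : Claim_equal_nextGreatesLetter := by
  intro letters target _ hpre
  obtain ⟨hne, hcases⟩ := hpre
  have hlen : 0 < letters.length := List.length_pos_of_ne_nil hne
  unfold Spec_nextGreatesLetter nextGreatesLetter nextGreatesLetter_alt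
  rcases hcases with hsorted | hall | hall
  · -- sorted case: binary search finds the first letter > target, like the scan
    have hs : ∀ (i j : Nat) (_ : i < letters.length) (_ : j < letters.length),
        i ≤ j → letters[i] ≤ letters[j] := by
      intro i j hi hj hij
      rcases Nat.lt_or_ge i j with h | h
      · exact String.le_iff_toList_le.mpr ((List.pairwise_iff_getElem.mp hsorted) i j hi hj h)
      · have : i = j := by omega
        subst this; exact le_refl _
    have hinv := loopA_inv letters target hs letters.length 0 ((letters.length : Int) - 1)
        (by omega) (by omega) (by omega) (by omega)
        (by intro i hi h; omega)
        (by intro i hi h; omega)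
    obtain ⟨hL0, hLlen, hlo, hhi⟩ := hinv
    set L := loopA letters target 0 ((letters.length : Int) - 1) with hLdef
    by_cases hcase : L < (letters.length : Int)
    · -- a letter greater than target exists; both return letters[L]
      have hknat : L.toNat < letters.length := by omega
      have hA : PySem.List.pyGetD letters L "" = letters[L.toNat] :=
        PySem.List.pyGetD_eq_getElem _ _ hL0 hcase
      simp only [hcase, if_true, hA]
      have hsplit : letters = letters.take L.toNat ++ letters[L.toNat] :: letters.drop (L.toNat + 1) := by
        rw [List.getElem_cons_drop, List.take_append_drop]
      conv_rhs => rw [hsplit]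
      rw [scanB_find]
      · intro x hx
        rw [List.mem_iff_getElem] at hx
        obtain ⟨i, hilt, hxeq⟩ := hx
        have hilen : i < letters.length := by
          simp [List.length_take] at hilt; omega
        have : x = letters[i] := by rw [← hxeq, List.getElem_take]
        subst this
        exact not_lt.mpr (hlo i hilen (by simp [List.length_take] at hilt; omega))
      · exact hhi L.toNat hknat (by omega)
    · -- no letter is greater than target; both wrap around to letters[0]
      simp only [hcase, if_false]
      rw [scanB_none]
      intro c hc
      rw [List.mem_iff_getElem] at hc
      obtain ⟨i, hi, hceq⟩ := hc
      subst hceq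
      exact not_lt.mpr (hlo i hi (by omega))
  · -- every letter ≤ target: both return letters[0]
    have hall' : ∀ c ∈ letters, c ≤ target :=
      fun c hc => String.le_iff_toList_le.mpr (hall c hc)
    have hL : loopA letters target 0 ((letters.length : Int) - 1) = (letters.length : Int) := by
      rw [loopA_all_le letters target hall' letters.length 0 ((letters.length : Int) - 1)
        (by omega) (by omega) (by omega) (by omega)]
      omega
    simp only [hL, lt_irrefl, if_false]
    rw [scanB_none]
    exact fun c hc => not_lt.mpr (hall' c hc)
  · -- every letter > target: both return letters[0]
    have hall' : ∀ c ∈ letters, target < c :=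
      fun c hc => String.lt_iff_toList_lt.mpr (hall c hc)
    have hL : loopA letters target 0 ((letters.length : Int) - 1) = 0 := by
      exact loopA_all_gt letters target hall' letters.length 0 ((letters.length : Int) - 1)
        (by omega) (by omega) (by omega)
    rw [hL]
    have h0len : (0 : Int) < (letters.length : Int) := by omega
    simp only [h0len, if_true]
    obtain ⟨c, rest, hcr⟩ := List.exists_cons_of_ne_nil hne
    subst hcr
    simp only [scanB, hall' c (by simp), if_true, PySem.List.pyGetD_zero_cons]
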